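-- pv_equiv track=rewrite | github.com/LleilaA13/Python-practice | exercise16/program.py | es36
-- ===== SOURCE A (Python) =====
-- def es36(dictionariesList):
--     diz = {}
--     keys = []
--     for d in dictionariesList:
--         keys.append(set(d.keys()))
--
--     inter_keys = keys[0]
--     for k in keys[1:]:
--         inter_keys = inter_keys.intersection(k)
--
--     for k in inter_keys:
--         vals = []
--         for d in dictionariesList:
--             vals.append(set(d[k]))
--         inter_val = vals[0]
--         for v in vals[1:]:
--             inter_val = inter_val.intersection(v)
--         diz[k] = sorted(list(inter_val))
--     return diz
-- ===== SOURCE B (Python) =====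
-- def es36(dictionariesList):
--     n = len(dictionariesList)
--     # tally: in how many dicts does each key occur (first-occurrence order)
--     key_count = {}
--     for d in dictionariesList:
--         for k in d.keys():
--             key_count[k] = key_count.get(k, 0) + 1
--     result = {}
--     for k, c in key_count.items():
--         if c == n:
--             # tally values (deduped per dict); keep those present in every dict
--             val_count = {}
--             for d in dictionariesList:
--                 for v in set(d[k]):
--                     val_count[v] = val_count.get(v, 0) + 1
--             result[k] = sorted(v for v, cv in val_count.items() if cv == n)
--     return result
-- ===== Notes on version B (the rewrite author's own statement) =====
-- stated objective: alternative
-- what changed: Replaces A's incremental set intersections with frequency tallies: B counts in how many dicts each key occurs (and, per common key, each per-dict-deduped value) and keeps exactly those whose count equals len(dictionariesList).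
import Mathlib
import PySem

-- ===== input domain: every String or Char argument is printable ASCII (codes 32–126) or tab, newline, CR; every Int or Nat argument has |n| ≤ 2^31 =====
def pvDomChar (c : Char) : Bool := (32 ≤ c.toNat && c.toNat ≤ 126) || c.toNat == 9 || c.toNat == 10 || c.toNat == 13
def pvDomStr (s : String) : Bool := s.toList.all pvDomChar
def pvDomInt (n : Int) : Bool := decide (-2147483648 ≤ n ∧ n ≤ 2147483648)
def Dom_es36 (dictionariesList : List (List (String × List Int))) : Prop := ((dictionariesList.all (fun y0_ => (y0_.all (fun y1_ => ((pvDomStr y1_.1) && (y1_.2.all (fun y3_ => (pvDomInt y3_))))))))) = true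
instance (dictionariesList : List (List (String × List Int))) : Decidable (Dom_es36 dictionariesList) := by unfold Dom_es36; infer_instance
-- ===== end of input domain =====

-- B replaces A's incremental set intersections with frequency tallies over all dicts (alternative decomposition, same cost).


-- ===== PORT A =====
def es36 (dictionariesList : List (List (String × List Int))) : List (String × List Int) :=
  -- keys = [set(d.keys()) for d in dictionariesList] (built by append, as in A)
  let keys : List (PySem.Set String) :=
    dictionariesList.foldl
      (fun ks d => ks ++ [PySem.Set.ofList (PySem.Dict.keys (PySem.Dict.ofList d))]) []
  match keys with
  | [] => []   -- keys[0]: IndexError in Python; excluded by Pre_es36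
  | k0 :: krest =>
    -- inter_keys = keys[0]; for k in keys[1:]: inter_keys = inter_keys.intersection(k)
    let interKeys : PySem.Set String := krest.foldl (fun acc k => PySem.Set.inter acc k) k0
    let diz : PySem.Dict String (List Int) :=
      interKeys.foldl (fun diz k =>
        let vals : List (PySem.Set Int) :=
          dictionariesList.foldl
            (fun vs d => vs ++ [PySem.Set.ofList ((PySem.Dict.ofList d).getD k [])]) []
        match vals with
        | [] => diz   -- unreachable: dictionariesList nonempty whenever keys is
        | v0 :: vrest =>
          let interVal : PySem.Set Int := vrest.foldl (fun acc v => PySem.Set.inter acc v) v0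
          diz.insert k (PySem.List.sorted interVal (fun x => x) false)) PySem.Dict.empty
    diz.items

-- ===== PORT B =====
def es36_alt (dictionariesList : List (List (String × List Int))) : List (String × List Int) :=
  let n : Int := dictionariesList.length
  let keyCount : PySem.Dict String Int :=
    dictionariesList.foldl
      (fun kc d => (PySem.Dict.keys (PySem.Dict.ofList d)).foldl
        (fun kc k => kc.insert k (kc.getD k 0 + 1)) kc) PySem.Dict.empty
  let result : PySem.Dict String (List Int) :=
    keyCount.items.foldl (fun res p =>
      if p.2 == n then
        let valCount : PySem.Dict Int Int :=
          dictionariesList.foldl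
            (fun vc d => (PySem.Set.ofList ((PySem.Dict.ofList d).getD p.1 [])).foldl
              (fun vc v => vc.insert v (vc.getD v 0 + 1)) vc) PySem.Dict.empty
        res.insert p.1
          (PySem.List.sorted ((valCount.items.filter (fun q => q.2 == n)).map (fun q => q.1))
            (fun x => x) false)
      else res) PySem.Dict.empty
  result.items

-- ===== PRECONDITION & SPEC =====
-- Pre_ excludes only the empty input list, on which A raises IndexError (keys[0]).
def Pre_es36 (dictionariesList : List (List (String × List Int))) : Prop :=
  dictionariesList ≠ []
instance (dictionariesList : List (List (String × List Int))) : Decidable (Pre_es36 dictionariesList) := by unfold Pre_es36; infer_instance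

def pvWitness_es36 : (List (List (String × List Int))) :=
  [[("a", [1, 2]), ("b", [3])], [("a", [2, 5]), ("c", [3])]]

def Spec_es36 (dictionariesList : List (List (String × List Int))) (out : List (String × List Int)) : Prop := out = es36_alt dictionariesList
instance (dictionariesList : List (List (String × List Int))) (out : List (String × List Int)) : Decidable (Spec_es36 dictionariesList out) := by unfold Spec_es36; infer_instance

-- ===== CLAIM (what is proved, stated in full; the proofs are below) =====
def Claim_equal_es36 : Prop := ∀ (dictionariesList : List (List (String × List Int))), Dom_es36 dictionariesList → Pre_es36 dictionariesList → Spec_es36 dictionariesList (es36 dictionariesList)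

-- ===== LEMMAS AND PROOFS =====
def pvK (d : List (String × List Int)) : List String := PySem.Dict.keys (PySem.Dict.ofList d)
def pvV (d : List (String × List Int)) (k : String) : List Int := (PySem.Dict.ofList d).getD k []
def pvVals (d0 : List (String × List Int)) (ds : List (List (String × List Int))) (k : String) : List Int :=
  PySem.List.sorted ((PySem.Set.ofList (pvV d0 k)).filter
    (fun v => (ds.map (fun d => PySem.Set.ofList (pvV d k))).all (fun t => PySem.Set.contains t v)))
    (fun x => x) false

theorem pv_inter_foldl {α : Type} [BEq α] (tr : List (PySem.Set α)) (t0 : List α) :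
    tr.foldl PySem.Set.inter t0 = t0.filter (fun x => tr.all (fun t => PySem.Set.contains t x)) := by
  induction tr generalizing t0 with
  | nil => simp
  | cons t tr ih =>
      simp only [List.foldl_cons, ih, PySem.Set.inter, List.filter_filter]
      apply List.filter_congr
      intro x _
      simp [Bool.and_comm]

theorem pv_flatten_count_le {α : Type} [BEq α] [LawfulBEq α] (ts : List (List α))
    (h : ∀ t ∈ ts, t.Nodup) (x : α) : (ts.flatten.count x) ≤ ts.length := by
  induction ts with
  | nil => simp
  | cons t ts ih =>
      simp only [List.flatten_cons, List.count_append, List.length_cons]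
      have h1 : t.count x ≤ 1 := List.nodup_iff_count_le_one.mp (h t (by simp)) x
      have h2 := ih (fun t ht => h t (by simp [ht]))
      omega

theorem pv_flatten_count_eq_iff {α : Type} [BEq α] [LawfulBEq α] (ts : List (List α))
    (h : ∀ t ∈ ts, t.Nodup) (x : α) :
    (ts.flatten.count x = ts.length) ↔ ∀ t ∈ ts, x ∈ t := by
  induction ts with
  | nil => simp
  | cons t ts ih =>
      simp only [List.flatten_cons, List.count_append, List.length_cons, List.mem_cons]
      have h1 : t.count x ≤ 1 := List.nodup_iff_count_le_one.mp (h t (by simp)) x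
      have h2 := pv_flatten_count_le ts (fun t ht => h t (by simp [ht])) x
      have h3 := ih (fun t ht => h t (by simp [ht]))
      constructor
      · intro he
        have ht1 : t.count x = 1 := by omega
        have hts : ts.flatten.count x = ts.length := by omega
        refine fun s hs => ?_
        rcases hs with rfl | hs
        · exact List.count_pos_iff.mp (by omega)
        · exact h3.mp hts s hs
      · intro hall
        have hxt : x ∈ t := hall t (Or.inl rfl)
        have ht1 : 0 < t.count x := List.count_pos_iff.mpr hxt
        have : ts.flatten.count x = ts.length := h3.mpr (fun s hs => hall s (Or.inr hs))
        omega

theorem pv_core {α : Type} [BEq α] [LawfulBEq α] (t0 : List α) (tr : List (List α))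
    (ht0 : t0.Nodup) (htr : ∀ t ∈ tr, t.Nodup) :
    (PySem.Set.ofList (t0 ++ tr.flatten)).filter
        (fun x => ((t0 ++ tr.flatten).count x : Int) == ((tr.length : Int) + 1))
      = t0.filter (fun x => tr.all (fun t => PySem.Set.contains t x)) := by
  have hall : ∀ t ∈ (t0 :: tr), t.Nodup := by
    intro t ht; rcases List.mem_cons.mp ht with rfl | ht
    · exact ht0
    · exact htr t ht
  have hiff : ∀ x : α, ((t0 ++ tr.flatten).count x = tr.length + 1) ↔ (x ∈ t0 ∧ ∀ t ∈ tr, x ∈ t) := by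
    intro x
    have := pv_flatten_count_eq_iff (t0 :: tr) hall x
    simp only [List.flatten_cons, List.length_cons, List.mem_cons] at this
    rw [this]
    constructor
    · intro h; exact ⟨h t0 (Or.inl rfl), fun t ht => h t (Or.inr ht)⟩
    · rintro ⟨h1, h2⟩ s hs
      rcases hs with rfl | hs
      · exact h1
      · exact h2 s hs
  have hp : ∀ x : α, (((t0 ++ tr.flatten).count x : Int) == ((tr.length : Int) + 1)) = true → x ∈ t0 := by
    intro x hx
    have : (t0 ++ tr.flatten).count x = tr.length + 1 := by
      have := beq_iff_eq.mp hx
      omega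
    exact ((hiff x).mp this).1
  -- left side collapses to a filter of t0
  rw [PySem.Set.ofList_append, PySem.Set.ofList_eq_self_of_nodup t0 ht0,
    PySem.Set.update_eq_append_filter, List.filter_append, List.filter_filter]
  have hnil : (PySem.Set.ofList tr.flatten).filter
      (fun y => ((t0 ++ tr.flatten).count y : Int) == ((tr.length : Int) + 1) && !PySem.Set.contains t0 y) = [] := by
    rw [List.filter_eq_nil_iff]
    intro a _ hcon
    simp only [Bool.and_eq_true, Bool.not_eq_true'] at hcon
    have hmem := hp a hcon.1
    have : PySem.Set.contains t0 a = true := by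
      simpa [PySem.Set.contains_iff] using hmem
    rw [(PySem.Set.contains_iff t0 a).mpr hmem] at hcon
    exact absurd hcon.2 (by simp)
  rw [hnil, List.append_nil]
  apply List.filter_congr
  intro x hx
  by_cases h2 : ∀ t ∈ tr, x ∈ t
  · have hc : (t0 ++ tr.flatten).count x = tr.length + 1 := (hiff x).mpr ⟨hx, h2⟩
    have hb : (((t0 ++ tr.flatten).count x : Int) == ((tr.length : Int) + 1)) = true := by
      rw [beq_iff_eq]; omega
    have ha : (tr.all (fun t => PySem.Set.contains t x)) = true := by
      simp only [List.all_eq_true]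
      intro t ht; exact (PySem.Set.contains_iff t x).mpr (h2 t ht)
    rw [hb, ha]
  · have hc : (t0 ++ tr.flatten).count x ≠ tr.length + 1 := fun h => h2 ((hiff x).mp h).2
    have hb : (((t0 ++ tr.flatten).count x : Int) == ((tr.length : Int) + 1)) = false := by
      rw [beq_eq_false_iff_ne]; intro h; apply hc; omega
    have ha : (tr.all (fun t => PySem.Set.contains t x)) = false := by
      rw [← Bool.not_eq_true]
      simp only [List.all_eq_true, not_forall]
      have := h2
      push Not at this
      obtain ⟨t, ht, hxt⟩ := this
      exact ⟨t, ht, fun hc2 => hxt ((PySem.Set.contains_iff t x).mp hc2)⟩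
    rw [hb, ha]

theorem pv_items_foldl_insert_cond {κ ν : Type} [BEq κ] [LawfulBEq κ]
    (xs : List κ) (p : κ → Bool) (v : κ → ν) (d : PySem.Dict κ ν)
    (hnd : xs.Nodup) (hfresh : ∀ x ∈ xs, d.contains x = false) :
    (xs.foldl (fun d x => if p x then d.insert x (v x) else d) d).items
      = d.items ++ (xs.filter p).map (fun x => (x, v x)) := by
  induction xs generalizing d with
  | nil => simp
  | cons x xs ih =>
      have hx : d.contains x = false := hfresh x (by simp)
      have hnd' : xs.Nodup := hnd.of_cons
      have hxs : x ∉ xs := (List.nodup_cons.mp hnd).1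
      by_cases hp : p x
      · simp only [List.foldl_cons, hp, if_pos]
        rw [ih (d.insert x (v x)) hnd' ?_]
        · rw [PySem.Dict.items_insert_of_not_contains d (v x) hx]
          simp [hp]
        · intro y hy
          rw [PySem.Dict.contains_insert]
          have : (y == x) = false := beq_eq_false_iff_ne.mpr (fun h => hxs (h ▸ hy))
          simp [this, hfresh y (by simp [hy])]
      · simp only [List.foldl_cons, hp, if_neg, Bool.false_eq_true, not_false_iff]
        rw [ih d hnd' (fun y hy => hfresh y (by simp [hy]))]
        simp [hp]

theorem pv_items_map {κ ν : Type} [BEq κ] [LawfulBEq κ] (l : List κ) (v : κ → ν) (hnd : l.Nodup) :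
    (l.foldl (fun d k => d.insert k (v k)) PySem.Dict.empty).items = l.map (fun k => (k, v k)) := by
  rw [PySem.Dict.items_foldl_insert_fresh l (fun a => a) v PySem.Dict.empty
    (fun a _ => PySem.Dict.contains_empty a) (by simpa)]
  simp [PySem.Dict.empty]

theorem pv_esA (d0 : List (String × List Int)) (ds : List (List (String × List Int))) :
    es36 (d0 :: ds) = ((pvK d0).filter
        (fun x => (ds.map (fun d => pvK d)).all (fun t => PySem.Set.contains t x))).map
      (fun k => (k, pvVals d0 ds k)) := by
  have hK : ∀ d : List (String × List Int), PySem.Set.ofList (PySem.Dict.ofList d).keys = (PySem.Dict.ofList d).keys :=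
    fun d => PySem.Set.ofList_eq_self_of_nodup _ (PySem.Dict.nodup_keys_ofList d)
  unfold es36
  simp only [PySem.List.foldl_append_singleton_eq_map, List.nil_append, List.map_cons, hK]
  rw [pv_inter_foldl]
  simp only [pv_inter_foldl]
  rw [pv_items_map _ _ ((PySem.Dict.nodup_keys_ofList d0).filter _)]
  simp only [pvVals, pvK, pvV, PySem.Set.contains]

theorem pv_esB (d0 : List (String × List Int)) (ds : List (List (String × List Int))) :
    es36_alt (d0 :: ds) = ((pvK d0).filter
        (fun x => (ds.map (fun d => pvK d)).all (fun t => PySem.Set.contains t x))).map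
      (fun k => (k, pvVals d0 ds k)) := by
  unfold es36_alt
  rw [show ((d0 :: ds).foldl (fun kc d => ((PySem.Dict.ofList d).keys).foldl
        (fun kc k => kc.insert k (kc.getD k 0 + 1)) kc) PySem.Dict.empty)
      = PySem.Dict.counter (((d0 :: ds).map (fun d => (PySem.Dict.ofList d).keys)).flatten) by
    rw [← PySem.Dict.foldl_insert_getD_add_one_eq_counter, List.foldl_flatten, List.foldl_map]]
  have hv : ∀ k : String, ((d0 :: ds).foldl (fun vc d =>
        (PySem.Set.ofList ((PySem.Dict.ofList d).getD k [])).foldl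
          (fun vc v => vc.insert v (vc.getD v 0 + 1)) vc) PySem.Dict.empty)
      = PySem.Dict.counter (((d0 :: ds).map
          (fun d => PySem.Set.ofList ((PySem.Dict.ofList d).getD k []))).flatten) := fun k => by
    rw [← PySem.Dict.foldl_insert_getD_add_one_eq_counter, List.foldl_flatten, List.foldl_map]
  simp only [hv, PySem.Dict.items_counter, List.foldl_map, List.filter_map, List.map_map,
    Function.comp_def, List.map_id']
  rw [pv_items_foldl_insert_cond _ _ _ _ (PySem.Set.nodup_ofList _)
    (fun x _ => PySem.Dict.contains_empty x)]
  have hc1 := pv_core ((PySem.Dict.ofList d0).keys)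
      (ds.map (fun d => (PySem.Dict.ofList d).keys)) (PySem.Dict.nodup_keys_ofList d0)
      (by intro t ht
          simp only [List.mem_map] at ht
          obtain ⟨d, _, rfl⟩ := ht
          exact PySem.Dict.nodup_keys_ofList d)
  rw [List.length_map] at hc1
  have hval : ∀ y : String,
      (PySem.Set.ofList ((List.map (fun d => PySem.Set.ofList ((PySem.Dict.ofList d).getD y []))
          (d0 :: ds)).flatten)).filter
        (fun k => ((List.count k ((List.map (fun d => PySem.Set.ofList ((PySem.Dict.ofList d).getD y []))
          (d0 :: ds)).flatten) : Int) == ((d0 :: ds).length : Int)))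
      = (PySem.Set.ofList ((PySem.Dict.ofList d0).getD y [])).filter
          (fun v => (ds.map (fun d => PySem.Set.ofList ((PySem.Dict.ofList d).getD y []))).all
            (fun t => PySem.Set.contains t v)) := by
    intro y
    have hc := pv_core (PySem.Set.ofList ((PySem.Dict.ofList d0).getD y []))
        (ds.map (fun d => PySem.Set.ofList ((PySem.Dict.ofList d).getD y [])))
        (PySem.Set.nodup_ofList _)
        (by intro t ht
            simp only [List.mem_map] at ht
            obtain ⟨d, _, rfl⟩ := ht
            exact PySem.Set.nodup_ofList _)
    rw [List.length_map] at hc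
    simp only [List.map_cons, List.flatten_cons, List.length_cons, Nat.cast_add, Nat.cast_one]
    exact hc
  simp only [List.map_cons, List.flatten_cons, List.length_cons, Nat.cast_add, Nat.cast_one] at hval ⊢
  simp only [hval]
  rw [hc1]
  simp only [pvVals, pvK, pvV, PySem.Set.contains, PySem.Dict.empty, List.nil_append]

-- ===== VERDICT (by name: the statement is the Claim_ definition above) =====
theorem es36_spec : Claim_equal_es36 := by
  intro dl _ hpre
  unfold Spec_es36
  cases dl with
  | nil => exact absurd rfl hpre
  | cons d0 ds => rw [pv_esA, pv_esB]
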